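-- pv_equiv track=rewrite | github.com/LucianoAAP/trybe-exercises | exercises/bloco-35-Algoritmos/algoritmos-de-ordenacao-e-busca/ex6.py | binary_search_false_iter
-- ===== SOURCE A (Python) =====
-- def binary_search_false_iter(array):
--     low_index = 0
--     high_index = len(array) - 1
--
--     while high_index >= low_index:
--
--         middle_index = (high_index + low_index) // 2
--
--         if array[middle_index] is False:
--             high_index = middle_index - 1
--         else:
--             low_index = middle_index + 1
--
--     return low_index
-- ===== SOURCE B (Python) =====
-- def binary_search_false_iter(array):
--     if not array:
--         return 0
--     mid = (len(array) - 1) // 2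
--     if array[mid] is False:
--         return binary_search_false_iter(array[:mid])
--     return mid + 1 + binary_search_false_iter(array[mid + 1:])
-- ===== Notes on version B (the rewrite author's own statement) =====
-- stated objective: alternative
-- what changed: B replaces A's iterative two-pointer (low/high) loop by a self-recursive divide-and-conquer on slices: it probes the same midpoint element, then recurses on array[:mid] or array[mid+1:] and adds the offset mid+1, with no index bookkeeping.
import Mathlib
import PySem

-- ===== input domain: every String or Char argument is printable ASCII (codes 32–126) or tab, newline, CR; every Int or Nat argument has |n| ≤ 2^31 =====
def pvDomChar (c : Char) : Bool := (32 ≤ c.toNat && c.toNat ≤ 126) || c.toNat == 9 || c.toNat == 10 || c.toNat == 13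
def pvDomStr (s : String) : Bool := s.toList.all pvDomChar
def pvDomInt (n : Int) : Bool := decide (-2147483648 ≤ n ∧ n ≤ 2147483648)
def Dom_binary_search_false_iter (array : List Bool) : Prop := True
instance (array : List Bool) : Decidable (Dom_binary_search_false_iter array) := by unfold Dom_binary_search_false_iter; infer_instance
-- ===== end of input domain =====

-- B: the iterative low/high binary-search loop of A is re-decomposed as a
-- divide-and-conquer recursion on slices (same midpoint probes, no index state).


-- ===== PORT A =====
-- the while loop over the state (low_index, high_index); fuel only makes the
-- recursion structural (len+1 steps always suffice, proved below) and
-- middle_index = (high_index + low_index) // 2 is inlined; array[middle_index]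
-- is always in range when the body runs, so pyGetD's default is never used
def pvBsLoop (array : List Bool) (fuel : Nat) (low high : Int) : Int :=
  match fuel with
  | 0 => low
  | f + 1 =>
    if high ≥ low then
      if PySem.List.pyGetD array (PySem.Int.floordiv (high + low) 2) false = false then
        pvBsLoop array f low (PySem.Int.floordiv (high + low) 2 - 1)
      else
        pvBsLoop array f (PySem.Int.floordiv (high + low) 2 + 1) high
    else
      low

def binary_search_false_iter (array : List Bool) : Int :=
  pvBsLoop array (array.length + 1) 0 ((array.length : Int) - 1)

-- ===== PORT B =====
-- Source B's self-recursion on slices; fuel only makes it structural (len+1 steps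
-- always suffice) and mid = (len(array) - 1) // 2 is inlined
def pvBsAlt (array : List Bool) (fuel : Nat) : Int :=
  match fuel with
  | 0 => 0
  | f + 1 =>
    if array = [] then
      0
    else
      if PySem.List.pyGetD array (PySem.Int.floordiv ((array.length : Int) - 1) 2) false = false then
        pvBsAlt (PySem.List.slice array none (some (PySem.Int.floordiv ((array.length : Int) - 1) 2))) f
      else
        PySem.Int.floordiv ((array.length : Int) - 1) 2 + 1 +
          pvBsAlt (PySem.List.slice array (some (PySem.Int.floordiv ((array.length : Int) - 1) 2 + 1)) none) f

def binary_search_false_iter_alt (array : List Bool) : Int :=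
  pvBsAlt array (array.length + 1)

-- ===== PRECONDITION & SPEC =====
def Spec_binary_search_false_iter (array : List Bool) (out : Int) : Prop := out = binary_search_false_iter_alt array
instance (array : List Bool) (out : Int) : Decidable (Spec_binary_search_false_iter array out) := by unfold Spec_binary_search_false_iter; infer_instance

-- ===== CLAIM (what is proved, stated in full; the proofs are below) =====
def Claim_equal_binary_search_false_iter : Prop := ∀ (array : List Bool), Dom_binary_search_false_iter array → Spec_binary_search_false_iter array (binary_search_false_iter array)

-- ===== LEMMAS AND PROOFS =====

-- B's recursion only ever needs fuel > length of its argument; any two such fuels agree.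
theorem pvBsAlt_fuel_congr : ∀ (f g : Nat) (s : List Bool),
    s.length < f → s.length < g → pvBsAlt s f = pvBsAlt s g := by
  intro f
  induction f with
  | zero => intro g s hf _; omega
  | succ f IH =>
    intro g s hf hg
    match g with
    | 0 => omega
    | g + 1 =>
      simp only [pvBsAlt]
      by_cases hs : s = []
      · rw [if_pos hs, if_pos hs]
      · rw [if_neg hs, if_neg hs]
        have hn : 0 < s.length := List.length_pos_iff.mpr hs
        have hb := PySem.Int.floordiv_two_mid_bounds (lo := 0) (hi := (s.length : Int) - 1) (by omega)
        rw [zero_add] at hb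
        by_cases hF : PySem.List.pyGetD s (PySem.Int.floordiv ((s.length : Int) - 1) 2) false = false
        · rw [if_pos hF, if_pos hF]
          apply IH
          · rw [PySem.List.slice_to s hb.1]
            simp only [List.length_take]
            omega
          · rw [PySem.List.slice_to s hb.1]
            simp only [List.length_take]
            omega
        · rw [if_neg hF, if_neg hF]
          congr 1
          apply IH
          · rw [PySem.List.slice_from s (by omega)]
            simp only [List.length_drop]
            omega
          · rw [PySem.List.slice_from s (by omega)]
            simp only [List.length_drop]
            omega

theorem pvBsAlt_nil (f : Nat) : pvBsAlt [] f = 0 := by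
  cases f <;> simp [pvBsAlt]

-- The loop on [low, high] computes low + B's value on the slice array[low : high+1].
theorem pvBsLoop_eq_alt (array : List Bool) : ∀ (fuel : Nat) (low high : Int),
    (high + 1 - low).toNat < fuel →
    0 ≤ low → low ≤ high + 1 → high < (array.length : Int) →
    pvBsLoop array fuel low high =
      low + pvBsAlt (PySem.List.slice array (some low) (some (high + 1)))
              ((high + 1 - low).toNat + 1) := by
  intro fuel
  induction fuel with
  | zero => intro low high hfuel _ _ _; omega
  | succ f IH =>
    intro low high hfuel h0 h1 h2
    have hs : PySem.List.slice array (some low) (some (high + 1)) =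
        (array.drop low.toNat).take ((high + 1).toNat - low.toNat) :=
      PySem.List.slice_toNat array h0 (by omega)
    set s := (array.drop low.toNat).take ((high + 1).toNat - low.toNat) with hsdef
    have hslen : s.length = (high + 1).toNat - low.toNat := by
      simp only [hsdef, List.length_take, List.length_drop]
      omega
    by_cases hlh : high ≥ low
    · -- loop body runs once; peel one step of B on the slice
      have hb : low ≤ PySem.Int.floordiv (high + low) 2 ∧ PySem.Int.floordiv (high + low) 2 ≤ high := by
        have := PySem.Int.floordiv_two_mid_bounds (lo := low) (hi := high) hlh
        rw [Int.add_comm low high] at this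
        exact this
      set mid := PySem.Int.floordiv (high + low) 2 with hmid
      have hsne : s ≠ [] := by
        intro hnil
        rw [hnil] at hslen
        simp at hslen
        omega
      have hmid' : PySem.Int.floordiv ((s.length : Int) - 1) 2 = mid - low := by
        have hc : ((s.length : Int)) - 1 = high - low := by rw [hslen]; omega
        rw [hc, hmid, PySem.Int.floordiv_eq_ediv_of_pos (by omega),
            PySem.Int.floordiv_eq_ediv_of_pos (by omega)]
        omega
      have hget : PySem.List.pyGetD s (mid - low) false = PySem.List.pyGetD array mid false := by
        rw [PySem.List.pyGetD_eq_getElem s false (by omega) (by rw [hslen]; omega),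
            PySem.List.pyGetD_eq_getElem array false (by omega) (by omega)]
        simp only [hsdef, List.getElem_take, List.getElem_drop]
        congr 1
        omega
      rw [hs]
      simp only [pvBsLoop, pvBsAlt]
      rw [if_pos hlh, if_neg hsne, hmid', hget, ← hmid]
      by_cases hF : PySem.List.pyGetD array mid false = false
      · rw [if_pos hF, if_pos hF]
        have hsl : PySem.List.slice s none (some (mid - low)) =
            (array.drop low.toNat).take (mid.toNat - low.toNat) := by
          rw [PySem.List.slice_to s (by omega), hsdef, List.take_take]
          congr 1
          omega
        have hlen2 : ((array.drop low.toNat).take (mid.toNat - low.toNat)).length = (mid - low).toNat := by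
          simp only [List.length_take, List.length_drop]
          omega
        rw [hsl,
            pvBsAlt_fuel_congr ((high + 1 - low).toNat) ((mid - low).toNat + 1) _
              (by rw [hlen2]; omega) (by rw [hlen2]; omega)]
        have hIH := IH low (mid - 1) (by omega) h0 (by omega) (by omega)
        rw [PySem.List.slice_toNat array h0 (by omega)] at hIH
        rw [show mid - 1 + 1 = mid by ring] at hIH
        rw [hIH]
      · rw [if_neg hF, if_neg hF]
        have hsl : PySem.List.slice s (some (mid - low + 1)) none =
            (array.drop (mid + 1).toNat).take ((high + 1).toNat - (mid + 1).toNat) := by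
          rw [PySem.List.slice_from s (by omega), hsdef, List.drop_take, List.drop_drop]
          congr 1
          · omega
          · congr 1
            omega
        have hlen2 : ((array.drop (mid + 1).toNat).take ((high + 1).toNat - (mid + 1).toNat)).length
            = (high + 1 - (mid + 1)).toNat := by
          simp only [List.length_take, List.length_drop]
          omega
        rw [hsl,
            pvBsAlt_fuel_congr ((high + 1 - low).toNat) ((high + 1 - (mid + 1)).toNat + 1) _
              (by rw [hlen2]; omega) (by rw [hlen2]; omega)]
        have hIH := IH (mid + 1) high (by omega) (by omega) (by omega) h2
        rw [PySem.List.slice_toNat array (by omega) (by omega)] at hIH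
        rw [hIH]
        omega
    · -- empty segment: the loop returns low and the slice is empty
      have hse : s = [] := by
        have : s.length = 0 := by rw [hslen]; omega
        exact List.length_eq_zero_iff.mp this
      rw [hs, hse, pvBsAlt_nil]
      simp only [pvBsLoop]
      rw [if_neg hlh]
      omega

theorem binary_search_false_iter_spec : Claim_equal_binary_search_false_iter := by
  intro array _
  unfold Spec_binary_search_false_iter binary_search_false_iter binary_search_false_iter_alt
  rw [pvBsLoop_eq_alt array (array.length + 1) 0 ((array.length : Int) - 1)
        (by omega) (by omega) (by omega) (by omega)]
  rw [show ((array.length : Int) - 1 + 1) = ((array.length : Int)) by ring,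
      PySem.List.slice_zero_start, PySem.List.slice_to_natCast, List.take_length, zero_add]
  congr 1
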